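-- pv_equiv track=rewrite | github.com/maxkuniev/bachelorproject | DSS/finalresults.py | extract_different_tail_elements_v2
-- ===== SOURCE A (Python) =====
-- def extract_different_tail_elements_v2(lst):
--     if not lst or len(lst) < 2:
--         return []
--
--     last_prefix = lst[-1].split('.')[0]
--
--     tail_elements = []
--     for i in range(len(lst) - 1, -1, -1):
--         current_prefix = lst[i].split('.')[0]
--         if current_prefix == last_prefix:
--             tail_elements.append(lst[i])
--         else:
--             break
--
--     if tail_elements:
--         start_index = len(lst) - len(tail_elements)
--         if start_index > 0:
--             prev_prefix = lst[start_index - 1].split('.')[0]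
--             if prev_prefix != last_prefix:
--                 return list(reversed(tail_elements))
--
--     return []
-- ===== SOURCE B (Python) =====
-- def extract_different_tail_elements_v2(lst):
--     if not lst or len(lst) < 2:
--         return []
--     last_prefix = lst[-1].split('.')[0]
--     boundary = -1
--     for i, x in enumerate(lst):
--         if x.split('.')[0] != last_prefix:
--             boundary = i
--     if boundary == -1:
--         return []
--     return lst[boundary + 1:]
-- ===== Notes on version B (the rewrite author's own statement) =====
-- stated objective: alternative
-- what changed: Replaces A's backward early-break scan that builds a reversed accumulator (plus a redundant previous-prefix re-check) with a single forward full scan that only tracks the index of the last element whose dotted prefix differs from the last element's, then returns one slice lst[boundary+1:].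
import Mathlib
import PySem

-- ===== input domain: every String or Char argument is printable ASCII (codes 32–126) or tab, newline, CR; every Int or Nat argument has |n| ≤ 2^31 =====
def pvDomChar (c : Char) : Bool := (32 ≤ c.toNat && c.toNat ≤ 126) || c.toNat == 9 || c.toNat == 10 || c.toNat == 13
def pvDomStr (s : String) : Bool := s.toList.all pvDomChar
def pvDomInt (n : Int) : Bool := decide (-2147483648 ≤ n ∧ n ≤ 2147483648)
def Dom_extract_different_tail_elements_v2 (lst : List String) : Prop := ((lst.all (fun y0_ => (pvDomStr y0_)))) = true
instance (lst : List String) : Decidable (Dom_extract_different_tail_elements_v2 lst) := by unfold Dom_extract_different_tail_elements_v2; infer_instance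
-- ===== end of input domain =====

-- B replaces A's backward early-break scan plus reversed-list construction with a single
-- forward full scan tracking the last non-matching index, followed by one slice (objective: alternative).

-- shared helper: s.split('.')[0]  (split with a non-empty separator never returns an empty list, so [0] is the head)
def pvPrefix (s : String) : String := ((PySem.Str.split? s ".").getD []).headD ""

-- ===== PORT A =====
-- A's 'for i in range(len(lst)-1, -1, -1): … lst[i] …' visits exactly the elements of
-- lst.reverse in order; ported as structural recursion over lst.reverse, stopping (break)
-- at the first non-matching prefix, appending to the accumulator like tail_elements.append.
def pvTailLoopA (lp : String) : List String → List String → List String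
  | [], acc => acc
  | x :: xs, acc => if pvPrefix x = lp then pvTailLoopA lp xs (acc ++ [x]) else acc

def extract_different_tail_elements_v2 (lst : List String) : List String :=
  if lst.length < 2 then []
  else
    match PySem.List.pyGet? lst (-1) with
    | none => []   -- unreachable: lst has ≥ 2 elements
    | some lastEl =>
      let lp := pvPrefix lastEl
      let t := pvTailLoopA lp lst.reverse []
      if t ≠ [] then
        if lst.length - t.length > 0 then
          if pvPrefix (lst.getD (lst.length - t.length - 1) "") ≠ lp then t.reverse else []
        else []
      else []

-- ===== PORT B =====
-- forward scan: boundary := last index whose prefix differs from last_prefix, else -1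
def pvBoundLoop (lp : String) : List String → Int → Int → Int
  | [], _, b => b
  | x :: xs, i, b => pvBoundLoop lp xs (i + 1) (if pvPrefix x ≠ lp then i else b)

def extract_different_tail_elements_v2_alt (lst : List String) : List String :=
  if lst.length < 2 then []
  else
    match PySem.List.pyGet? lst (-1) with
    | none => []   -- unreachable: lst has ≥ 2 elements
    | some lastEl =>
      let lp := pvPrefix lastEl
      let b := pvBoundLoop lp lst 0 (-1)
      if b = -1 then [] else PySem.List.slice lst (some (b + 1)) none

-- ===== PRECONDITION & SPEC =====
def Spec_extract_different_tail_elements_v2 (lst : List String) (out : List String) : Prop := out = extract_different_tail_elements_v2_alt lst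
instance (lst : List String) (out : List String) : Decidable (Spec_extract_different_tail_elements_v2 lst out) := by unfold Spec_extract_different_tail_elements_v2; infer_instance

-- ===== CLAIM (what is proved, stated in full; the proofs are below) =====
def Claim_equal_extract_different_tail_elements_v2 : Prop := ∀ (lst : List String), Dom_extract_different_tail_elements_v2 lst → Spec_extract_different_tail_elements_v2 lst (extract_different_tail_elements_v2 lst)

-- ===== LEMMAS AND PROOFS =====

theorem pvTailLoopA_eq_takeWhile (lp : String) (xs acc : List String) :
    pvTailLoopA lp xs acc = acc ++ xs.takeWhile (fun x => pvPrefix x == lp) := by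
  induction xs generalizing acc with
  | nil => simp [pvTailLoopA]
  | cons x xs ih =>
    by_cases h : pvPrefix x = lp
    · simp [pvTailLoopA, h, ih,
        List.takeWhile_cons_of_pos (p := fun x => pvPrefix x == lp) (by simpa using h)]
    · simp [pvTailLoopA, h,
        List.takeWhile_cons_of_neg (p := fun x => pvPrefix x == lp) (by simpa using h)]

theorem pvBoundLoop_append (lp : String) (ys zs : List String) (i b : Int) :
    pvBoundLoop lp (ys ++ zs) i b = pvBoundLoop lp zs (i + ys.length) (pvBoundLoop lp ys i b) := by
  induction ys generalizing i b with
  | nil => simp [pvBoundLoop]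
  | cons y ys ih =>
    simp only [List.cons_append, pvBoundLoop, ih, List.length_cons]
    have harith : i + 1 + (ys.length : Int) = i + ((ys.length + 1 : Nat) : Int) := by
      push_cast; ring
    rw [harith]

theorem pvBoundLoop_char (lp : String) (xs : List String) (i b : Int) :
    pvBoundLoop lp xs i b =
      if (xs.reverse.takeWhile (fun x => pvPrefix x == lp)).length = xs.length then b
      else i + ((xs.length - 1 - (xs.reverse.takeWhile (fun x => pvPrefix x == lp)).length : Nat) : Int) := by
  induction xs using List.reverseRecOn generalizing i b with
  | nil => simp [pvBoundLoop]
  | append_singleton ys x ih =>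
    rw [pvBoundLoop_append]
    have hk : (ys.reverse.takeWhile (fun x => pvPrefix x == lp)).length ≤ ys.length := by
      simpa using (List.takeWhile_prefix (l := ys.reverse) (p := fun x => pvPrefix x == lp)).length_le
    by_cases hx : pvPrefix x = lp
    · simp only [pvBoundLoop, hx, ne_eq, not_true_eq_false, if_false,
        List.reverse_append, List.reverse_singleton, List.singleton_append,
        List.takeWhile_cons_of_pos (p := fun x => pvPrefix x == lp) (by simpa using hx),
        List.length_cons, List.length_append, List.length_nil]
      rw [ih]
      by_cases h : (ys.reverse.takeWhile (fun x => pvPrefix x == lp)).length = ys.length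
      · simp [h]
      · have h2 : ¬ ((ys.reverse.takeWhile (fun x => pvPrefix x == lp)).length + 1 = ys.length + 1) := by omega
        rw [if_neg h, if_neg h2]
        congr 1
        omega
    · simp only [pvBoundLoop, hx, ne_eq, not_false_eq_true, if_true,
        List.reverse_append, List.reverse_singleton, List.singleton_append,
        List.takeWhile_cons_of_neg (p := fun x => pvPrefix x == lp) (by simpa using hx),
        List.length_nil, List.length_append, List.length_singleton]
      rw [if_neg (by omega)]
      have : ((ys.length + 1 - 1 - 0 : Nat) : Int) = (ys.length : Int) := by omega
      rw [this]

-- the element just after the matching suffix does not satisfy the predicate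
theorem takeWhile_stop {α : Type} (q : α → Bool) (l : List α) (d : α)
    (h : (l.takeWhile q).length < l.length) :
    q (l.getD (l.takeWhile q).length d) = false := by
  induction l with
  | nil => simp at h
  | cons x xs ih =>
    by_cases hx : q x
    · rw [List.takeWhile_cons_of_pos hx] at h ⊢
      simp only [List.length_cons] at h ⊢
      simpa using ih (by omega)
    · rw [List.takeWhile_cons_of_neg (by simpa using hx)]
      simpa using hx

theorem getD_reverse {α : Type} (l : List α) (k : Nat) (d : α) (h : k < l.length) :
    l.reverse.getD k d = l.getD (l.length - 1 - k) d := by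
  have h1 : k < l.reverse.length := by simpa using h
  have h2 : l.length - 1 - k < l.length := by omega
  rw [List.getD_eq_getElem l.reverse d h1, List.getD_eq_getElem l d h2,
    List.getElem_reverse]

-- ===== VERDICT (by name: the statement is the Claim_ definition above) =====
theorem extract_different_tail_elements_v2_spec : Claim_equal_extract_different_tail_elements_v2 := by
  intro lst _
  unfold Spec_extract_different_tail_elements_v2 extract_different_tail_elements_v2 extract_different_tail_elements_v2_alt
  by_cases hlen : lst.length < 2
  · simp [hlen]
  · simp only [hlen, if_false]
    have hne : lst ≠ [] := by intro h; subst h; simp at hlen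
    rw [PySem.List.pyGet?_neg_one]
    obtain ⟨lastEl, rest, hrev⟩ : ∃ y ys, lst.reverse = y :: ys := by
      cases hr : lst.reverse with
      | nil => exact absurd (by simpa using congrArg List.reverse hr) hne
      | cons y ys => exact ⟨y, ys, rfl⟩
    have hlast : lst.getLast? = some lastEl := by
      rw [List.getLast?_eq_head?_reverse, hrev]; rfl
    rw [hlast]
    dsimp only
    rw [pvTailLoopA_eq_takeWhile, pvBoundLoop_char]
    simp only [List.nil_append, zero_add]
    set lp := pvPrefix lastEl with hlp
    set t : List String := lst.reverse.takeWhile (fun x => pvPrefix x == lp) with ht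
    have htc : t = lastEl :: rest.takeWhile (fun x => pvPrefix x == lp) := by
      rw [ht, hrev, List.takeWhile_cons_of_pos (by simp [hlp])]
    have htne : t ≠ [] := by rw [htc]; exact List.cons_ne_nil _ _
    have hkle : t.length ≤ lst.length := by
      have := (List.takeWhile_prefix (l := lst.reverse) (p := fun x => pvPrefix x == lp)).length_le
      rw [← ht] at this
      simpa using this
    by_cases hfull : t.length = lst.length
    · -- all elements share the prefix: A's start_index is 0, B's boundary is -1
      simp [htne, hfull]
    · have hklt : t.length < lst.length := lt_of_le_of_ne hkle hfull
      have hsi : lst.length - t.length > 0 := by omega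
      have hstop : (fun x => pvPrefix x == lp) (lst.reverse.getD t.length "") = false := by
        have := takeWhile_stop (fun x => pvPrefix x == lp) lst.reverse ""
          (by rw [← ht]; simpa using hklt)
        rw [← ht] at this
        exact this
      have hidx : lst.reverse.getD t.length "" = lst.getD (lst.length - t.length - 1) "" := by
        rw [getD_reverse lst t.length "" hklt]
        congr 1
        omega
      have hprev : pvPrefix (lst.getD (lst.length - t.length - 1) "") ≠ lp := by
        rw [← hidx]
        intro h
        have hstop' : (pvPrefix (lst.reverse.getD t.length "") == lp) = false := hstop
        rw [h] at hstop'
        simp at hstop'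
      rw [if_pos htne, if_pos hsi, if_pos hprev, if_neg hfull,
        if_neg (show ¬ ((lst.length - 1 - t.length : Nat) : Int) = -1 by omega)]
      have hb1 : ((lst.length - 1 - t.length : Nat) : Int) + 1 = ((lst.length - t.length : Nat) : Int) := by
        omega
      rw [hb1, PySem.List.slice_from_natCast]
      have hpref : t = lst.reverse.take t.length := by
        have := List.takeWhile_prefix (l := lst.reverse) (p := fun x => pvPrefix x == lp)
        rw [← ht] at this
        exact List.prefix_iff_eq_take.mp this
      have : t.reverse = lst.drop (lst.length - t.length) := by
        conv_lhs => rw [hpref]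
        rw [List.reverse_take]
        simp
      exact this
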